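-- pv_equiv track=rewrite | github.com/FreddeFrallan/ImageCaption-DD2424 | Utils.py | cleanseOutputs
-- ===== SOURCE A (Python) =====
-- def cleanseOutputs(inferenceResults):
--     cleanSents = []
--     for sent in zip(*[r for r in inferenceResults]):
--         temp = ""
--         for w in sent:
--             if (w == "<end>"):
--                 break
--             temp += w + " "
--         cleanSents.append(temp.strip())
--     return cleanSents
-- ===== SOURCE B (Python) =====
-- def cleanseOutputs(inferenceResults):
--     cleanSents = []
--     for sent in zip(*inferenceResults):
--         cut = sent.index("<end>") if "<end>" in sent else len(sent)
--         cleanSents.append(" ".join(sent[:cut]).strip())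
--     return cleanSents
-- ===== Notes on version B (the rewrite author's own statement) =====
-- stated objective: simpler
-- what changed: Each column's sentence is built by locating the first '<end>' index and doing one slice + ' '.join (plus a strip for edge whitespace, matching A), instead of A's word-by-word string accumulation with a break.
import Mathlib
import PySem

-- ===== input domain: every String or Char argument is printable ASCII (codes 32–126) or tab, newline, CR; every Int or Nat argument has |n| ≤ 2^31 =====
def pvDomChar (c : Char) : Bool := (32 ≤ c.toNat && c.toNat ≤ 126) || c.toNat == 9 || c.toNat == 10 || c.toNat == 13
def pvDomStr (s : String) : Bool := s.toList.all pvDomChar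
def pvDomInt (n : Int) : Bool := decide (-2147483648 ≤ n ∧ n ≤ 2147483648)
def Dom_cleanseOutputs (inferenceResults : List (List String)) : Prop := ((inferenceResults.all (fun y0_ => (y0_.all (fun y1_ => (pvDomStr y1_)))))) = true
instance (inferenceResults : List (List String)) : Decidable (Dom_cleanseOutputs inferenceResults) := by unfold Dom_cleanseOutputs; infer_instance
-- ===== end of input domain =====

-- B replaces A's word-by-word string accumulation with break by finding the first '<end>' index
-- and doing one slice + join (objective: simpler); same return value on every input.

-- ===== PORT A =====
-- zip(*rows): hand port of Python's variadic zip over a list of lists (exact: stops at the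
-- shortest row; zip of no iterables is empty); columns are the tuples, as List String.
def pyZipStar (ls : List (List String)) : List (List String) :=
  if _h : ls = [] then []
  else if _h2 : ls.any (·.isEmpty) then []
  else (ls.map (fun l => l.headD "")) :: pyZipStar (ls.map (·.tail))
termination_by (ls.headD []).length
decreasing_by
  cases ls with
  | nil => exact absurd rfl _h
  | cons l rest =>
      cases l with
      | nil => simp at _h2
      | cons c cs => simp

-- the inner 'for w in sent: if w == "<end>": break; temp += w + " "' loop
def aInner : List String → String → String
  | [], temp => temp
  | w :: ws, temp => if w == "<end>" then temp else aInner ws (temp ++ w ++ " ")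

def cleanseOutputs (inferenceResults : List (List String)) : List String :=
  (pyZipStar inferenceResults).foldl
    (fun cleanSents sent => cleanSents ++ [PySem.Str.strip (aInner sent "")]) []

-- ===== PORT B =====
-- cut = sent.index("<end>") if "<end>" in sent else len(sent); " ".join(sent[:cut]).strip()
def bCol (sent : List String) : String :=
  PySem.Str.strip (PySem.Str.join " " (PySem.List.slice sent none (some
    (if sent.contains "<end>" then (((PySem.List.index? sent "<end>").getD 0 : Nat) : Int)
     else (sent.length : Int)))))

def cleanseOutputs_alt (inferenceResults : List (List String)) : List String :=
  (pyZipStar inferenceResults).foldl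
    (fun cleanSents sent => cleanSents ++ [bCol sent]) []

-- ===== PRECONDITION & SPEC =====
def Spec_cleanseOutputs (inferenceResults : List (List String)) (out : List String) : Prop := out = cleanseOutputs_alt inferenceResults
instance (inferenceResults : List (List String)) (out : List String) : Decidable (Spec_cleanseOutputs inferenceResults out) := by unfold Spec_cleanseOutputs; infer_instance

-- ===== CLAIM (what is proved, stated in full; the proofs are below) =====
def Claim_equal_cleanseOutputs : Prop := ∀ (inferenceResults : List (List String)), Dom_cleanseOutputs inferenceResults → Spec_cleanseOutputs inferenceResults (cleanseOutputs inferenceResults)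

-- ===== LEMMAS AND PROOFS =====

-- B's slice ends exactly where A's break fires: sent[:cut] is the longest "<end>"-free prefix
theorem slice_cut_eq_takeWhile (sent : List String) :
    PySem.List.slice sent none (some
      (if sent.contains "<end>" then (((PySem.List.index? sent "<end>").getD 0 : Nat) : Int)
       else (sent.length : Int)))
      = sent.takeWhile (fun w => !(w == "<end>")) := by
  by_cases hmem : "<end>" ∈ sent
  · have hc : sent.contains "<end>" = true := by simpa using hmem
    obtain ⟨k, hk⟩ : ∃ k, PySem.List.index? sent "<end>" = some k := by
      cases h : PySem.List.index? sent "<end>" with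
      | none => exact absurd ((PySem.List.index?_eq_none_iff sent "<end>").mp h) (by simpa using hmem)
      | some k => exact ⟨k, rfl⟩
    obtain ⟨pre, suf, hsent, hlen, hpre⟩ := (PySem.List.index?_eq_some_iff sent "<end>" k).mp hk
    rw [if_pos hc, hk]
    simp only [Option.getD_some]
    rw [PySem.List.slice_to _ (by positivity), Int.toNat_natCast, hsent, ← hlen]
    rw [List.take_left, List.takeWhile_append]
    have hall : pre.takeWhile (fun w => !(w == "<end>")) = pre := by
      apply List.takeWhile_eq_self_iff.mpr
      intro x hx
      simp only [Bool.not_eq_eq_eq_not, Bool.not_true, beq_eq_false_iff_ne, ne_eq]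
      rintro rfl; exact hpre hx
    rw [hall]
    simp
  · have hc : sent.contains "<end>" = false := by simpa using hmem
    rw [if_neg (by simpa using hmem)]
    rw [PySem.List.slice_to _ (by positivity), Int.toNat_natCast, List.take_length]
    symm
    apply List.takeWhile_eq_self_iff.mpr
    intro x hx
    simp only [Bool.not_eq_eq_eq_not, Bool.not_true, beq_eq_false_iff_ne, ne_eq]
    rintro rfl; exact hmem hx

-- A's inner loop is a fold over that same prefix
theorem aInner_eq_foldl (sent : List String) (temp : String) :
    aInner sent temp
      = (sent.takeWhile (fun w => !(w == "<end>"))).foldl (fun a w => a ++ w ++ " ") temp := by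
  induction sent generalizing temp with
  | nil => rfl
  | cons w ws ih =>
      by_cases h : w = "<end>"
      · subst h; simp [aInner, List.takeWhile]
      · have hb : (w == "<end>") = false := by simpa using h
        simp [aInner, List.takeWhile, hb, ih]

-- character-level image of A's accumulation
theorem foldl_toList (ws : List String) (t : String) :
    (ws.foldl (fun a w => a ++ w ++ " ") t).toList
      = ws.foldl (fun a w => a ++ w.toList ++ [' ']) t.toList := by
  induction ws generalizing t with
  | nil => rfl
  | cons w rest ih =>
      simp only [List.foldl_cons, ih]
      congr 1
      simp [String.toList_append]

theorem foldl_chars_eq (ws : List String) (t : List Char) :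
    ws.foldl (fun a w => a ++ w.toList ++ [' ']) t
      = t ++ (ws.map (fun w => w.toList ++ [' '])).flatten := by
  induction ws generalizing t with
  | nil => simp
  | cons w rest ih =>
      simp only [List.foldl_cons, List.map_cons, List.flatten_cons]
      rw [ih]
      simp

theorem flatten_eq_join_space (ws : List String) (h : ws ≠ []) :
    (ws.map (fun w => w.toList ++ [' '])).flatten
      = PySem.Chars.join [' '] (ws.map String.toList) ++ [' '] := by
  induction ws with
  | nil => exact absurd rfl h
  | cons w rest ih =>
      cases rest with
      | nil => simp [PySem.Chars.join, List.intercalate]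
      | cons d rest' =>
          simp only [List.map_cons]
          rw [PySem.Chars.join_cons_cons]
          have := ih (by simp)
          simp only [List.map_cons, List.flatten_cons] at this ⊢
          rw [this]
          simp

theorem rstrip_append_space (cs : List Char) :
    PySem.Chars.rstrip (cs ++ [' ']) = PySem.Chars.rstrip cs := by
  unfold PySem.Chars.rstrip
  rw [List.reverse_append]
  simp [show PySem.Chars.isspace ' ' = true from rfl]

theorem strip_append_space (cs : List Char) :
    PySem.Chars.strip (cs ++ [' ']) = PySem.Chars.strip cs := by
  unfold PySem.Chars.strip PySem.Chars.lstrip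
  rw [List.dropWhile_append]
  split_ifs with h
  · have h' : List.dropWhile PySem.Chars.isspace cs = [] := by
      simpa [List.isEmpty_iff] using h
    rw [h']
    simp [show PySem.Chars.isspace ' ' = true from rfl]
  · exact rstrip_append_space _

-- the per-column equality
theorem col_eq (sent : List String) : PySem.Str.strip (aInner sent "") = bCol sent := by
  unfold bCol
  rw [slice_cut_eq_takeWhile, aInner_eq_foldl]
  unfold PySem.Str.strip
  congr 1
  rw [foldl_toList, PySem.Str.toList_join, foldl_chars_eq]
  cases h : sent.takeWhile (fun w => !(w == "<end>")) with
  | nil => simp [PySem.Chars.join, List.intercalate]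
  | cons w rest =>
      rw [flatten_eq_join_space _ (by simp)]
      have ht : ("" : String).toList = [] := rfl
      rw [ht, List.nil_append, strip_append_space]
      rfl

-- ===== VERDICT (by name: the statement is the Claim_ definition above) =====
theorem cleanseOutputs_spec : Claim_equal_cleanseOutputs := by
  intro xs _
  show cleanseOutputs xs = cleanseOutputs_alt xs
  unfold cleanseOutputs cleanseOutputs_alt
  rw [PySem.List.foldl_append_singleton_eq_map, PySem.List.foldl_append_singleton_eq_map]
  simp only [List.nil_append]
  exact List.map_congr_left (fun sent _ => col_eq sent)
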